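-- pv_equiv track=rewrite | github.com/mjmoosavizade/Sahara | cart/views.py | _city_fmt
-- ===== SOURCE A (Python) =====
-- def _city_fmt(json_data):
--     province_table = {}
--     for item in json_data:
--         print (item["state"])
--         if not (p:=item["province"]) in province_table.keys():
--             province_table[p] = [item["state"]]
--         else:
--             if not item["state"] in province_table[p]:
--                 province_table[p].append(item["state"])
--     return province_table
-- ===== SOURCE B (Python) =====
-- def _city_fmt(json_data):
--     for item in json_data:
--         print (item["state"])
--     provinces = list(dict.fromkeys(item["province"] for item in json_data))
--     return {p: list(dict.fromkeys(item["state"] for item in json_data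
--                                   if item["province"] == p))
--             for p in provinces}
-- ===== Notes on version B (the rewrite author's own statement) =====
-- stated objective: alternative
-- what changed: A builds the grouping incrementally in one pass over a dict of deduplicated lists; B keeps no dict at all: it lists the distinct provinces in first-occurrence order, then for each province rescans json_data to collect and dedup that province's states (nested scans instead of an incremental dict).
import Mathlib
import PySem

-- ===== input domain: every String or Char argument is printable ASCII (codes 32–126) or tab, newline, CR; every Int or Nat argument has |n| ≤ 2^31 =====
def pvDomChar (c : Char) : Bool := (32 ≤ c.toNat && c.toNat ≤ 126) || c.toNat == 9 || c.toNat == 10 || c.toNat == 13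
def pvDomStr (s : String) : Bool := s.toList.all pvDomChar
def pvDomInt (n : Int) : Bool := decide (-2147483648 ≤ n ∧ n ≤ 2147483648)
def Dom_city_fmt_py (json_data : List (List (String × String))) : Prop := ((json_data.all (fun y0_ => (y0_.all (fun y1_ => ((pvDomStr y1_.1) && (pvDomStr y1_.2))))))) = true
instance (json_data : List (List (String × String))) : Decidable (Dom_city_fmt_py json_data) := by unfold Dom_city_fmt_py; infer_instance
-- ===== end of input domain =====

-- B keeps no dict: it lists the distinct provinces, then rescans json_data per province to collect that
-- province's deduplicated states; the equivalence is about the RETURN value only (both Pythons print each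
-- item["state"] in the same order, a side effect not modelled here).

-- item[k]: first-match lookup in the association list (KeyError, excluded by Pre_, gives the unclaimed default "")
def pvKey (item : List (String × String)) (k : String) : String :=
  ((PySem.Dict.mk item).get? k).getD ""

-- ===== PORT A =====
def stepA (d : PySem.Dict String (List String)) (item : List (String × String)) :
    PySem.Dict String (List String) :=
  let s := pvKey item "state"
  let p := pvKey item "province"
  if d.contains p = false then d.insert p [s]
  else if (d.getD p []).contains s then d
  else d.modify p [] (fun l => l ++ [s])

def city_fmt_py (json_data : List (List (String × String))) : List (String × List String) :=
  (json_data.foldl stepA PySem.Dict.empty).items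

-- ===== PORT B =====
def city_fmt_py_alt (json_data : List (List (String × String))) : List (String × List String) :=
  let provinces := PySem.List.dedup (json_data.map (fun item => pvKey item "province"))
  provinces.map (fun p =>
    (p, PySem.List.dedup
          ((json_data.filter (fun item => pvKey item "province" == p)).map
            (fun item => pvKey item "state"))))

-- ===== PRECONDITION & SPEC =====
-- Pre_ excludes exactly the items missing a "state" or "province" key, on which both Pythons raise KeyError.
def Pre_city_fmt_py (json_data : List (List (String × String))) : Prop :=
  ∀ item ∈ json_data, (item.any (fun kv => kv.1 == "state")) = true ∧ (item.any (fun kv => kv.1 == "province")) = true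
instance (json_data : List (List (String × String))) : Decidable (Pre_city_fmt_py json_data) := by unfold Pre_city_fmt_py; infer_instance
def pvWitness_city_fmt_py : (List (List (String × String))) := ([[("state", "Yazd"), ("province", "Yazd")]])

def Spec_city_fmt_py (json_data : List (List (String × String))) (out : List (String × List String)) : Prop := out = city_fmt_py_alt json_data
instance (json_data : List (List (String × String))) (out : List (String × List String)) : Decidable (Spec_city_fmt_py json_data out) := by unfold Spec_city_fmt_py; infer_instance

-- ===== CLAIM (what is proved, stated in full; the proofs are below) =====
def Claim_equal_city_fmt_py : Prop := ∀ (json_data : List (List (String × String))), Dom_city_fmt_py json_data → Pre_city_fmt_py json_data → Spec_city_fmt_py json_data (city_fmt_py json_data)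

-- ===== LEMMAS AND PROOFS =====

def pvProv (item : List (String × String)) : String := pvKey item "province"
def pvSt (item : List (String × String)) : String := pvKey item "state"

-- the provinces of a prefix, distinct, in first-occurrence order
def pvP (l : List (List (String × String))) : List String :=
  PySem.Set.ofList (l.map pvProv)

-- the distinct states of province p within a prefix, in first-occurrence order
def pvS (l : List (List (String × String))) (p : String) : List String :=
  PySem.Set.ofList ((l.filter (fun i => pvProv i == p)).map pvSt)

def pvInv (l : List (List (String × String))) (d : PySem.Dict String (List String)) : Prop :=
  d.keys = pvP l ∧
  ∀ p, d.get? p = if p ∈ l.map pvProv then some (pvS l p) else none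

theorem pvP_snoc (l : List (List (String × String))) (x : List (String × String)) :
    pvP (l ++ [x]) = PySem.Set.add (pvP l) (pvProv x) := by
  simp [pvP, PySem.Set.ofList_append_singleton]

theorem pvS_snoc_eq (l : List (List (String × String))) (x : List (String × String)) :
    pvS (l ++ [x]) (pvProv x) = PySem.Set.add (pvS l (pvProv x)) (pvSt x) := by
  unfold pvS
  rw [List.filter_append]
  have hf : List.filter (fun i => pvProv i == pvProv x) [x] = [x] := by simp
  rw [hf, List.map_append]
  simp only [List.map_cons, List.map_nil]
  rw [PySem.Set.ofList_append_singleton]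

theorem pvS_snoc_ne (l : List (List (String × String))) (x : List (String × String))
    (q : String) (h : q ≠ pvProv x) : pvS (l ++ [x]) q = pvS l q := by
  have hne : (pvProv x == q) = false := by
    rw [beq_eq_false_iff_ne]
    exact fun he => h he.symm
  simp [pvS, List.filter_append, hne]

theorem pvS_of_not_mem (l : List (List (String × String))) (p : String)
    (h : p ∉ l.map pvProv) : pvS l p = [] := by
  have : l.filter (fun i => pvProv i == p) = [] := by
    rw [List.filter_eq_nil_iff]
    intro a ha hb
    exact h (List.mem_map.mpr ⟨a, ha, by simpa using hb⟩)
  simp [pvS, this]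

theorem pvInv_step (l : List (List (String × String))) (d : PySem.Dict String (List String))
    (x : List (String × String)) (h : pvInv l d) : pvInv (l ++ [x]) (stepA d x) := by
  obtain ⟨hk, hg⟩ := h
  by_cases hm : pvProv x ∈ l.map pvProv
  · -- province already present
    have hgp : d.get? (pvProv x) = some (pvS l (pvProv x)) := by rw [hg]; simp [hm]
    have hc : d.contains (pvProv x) = true := by
      rw [PySem.Dict.contains_eq_isSome_get?, hgp]; rfl
    have hgetD : d.getD (pvProv x) [] = pvS l (pvProv x) :=
      PySem.Dict.getD_of_get?_eq_some d [] hgp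
    by_cases hsm : pvSt x ∈ pvS l (pvProv x)
    · -- state already recorded: dict unchanged
      have hA : stepA d x = d := by
        show (if d.contains (pvProv x) = false then d.insert (pvProv x) [pvSt x]
              else if (d.getD (pvProv x) []).contains (pvSt x) then d
              else d.modify (pvProv x) [] (fun l => l ++ [pvSt x])) = d
        simp [hc, hgetD, hsm]
      rw [hA]
      refine ⟨?_, ?_⟩
      · rw [hk, pvP_snoc, PySem.Set.add_of_mem (by rw [pvP, PySem.Set.mem_ofList]; exact hm)]
      · intro q
        by_cases hq : q = pvProv x
        · subst hq
          rw [hgp, pvS_snoc_eq, PySem.Set.add_of_mem hsm]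
          simp [hm]
        · rw [hg, pvS_snoc_ne l x q hq]
          simp [List.mem_map, hq]
    · -- new state for an existing province: append
      have hA : stepA d x = d.insert (pvProv x) (pvS l (pvProv x) ++ [pvSt x]) := by
        show (if d.contains (pvProv x) = false then d.insert (pvProv x) [pvSt x]
              else if (d.getD (pvProv x) []).contains (pvSt x) then d
              else d.modify (pvProv x) [] (fun l => l ++ [pvSt x])) = _
        simp [hc, hgetD, hsm, PySem.Dict.modify]
      rw [hA]
      refine ⟨?_, ?_⟩
      · rw [PySem.Dict.keys_insert_of_contains _ _ hc, hk, pvP_snoc,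
          PySem.Set.add_of_mem (by rw [pvP, PySem.Set.mem_ofList]; exact hm)]
      · intro q
        by_cases hq : q = pvProv x
        · subst hq
          rw [PySem.Dict.get?_insert_self, pvS_snoc_eq, PySem.Set.add_of_not_mem hsm]
          simp [hm]
        · rw [PySem.Dict.get?_insert_of_ne _ _ hq, hg, pvS_snoc_ne l x q hq]
          simp [List.mem_map, hq]
  · -- new province
    have hgp : d.get? (pvProv x) = none := by rw [hg]; simp [hm]
    have hc : d.contains (pvProv x) = false := by
      rw [PySem.Dict.contains_eq_isSome_get?, hgp]; rfl
    have hA : stepA d x = d.insert (pvProv x) [pvSt x] := by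
      show (if d.contains (pvProv x) = false then d.insert (pvProv x) [pvSt x]
            else if (d.getD (pvProv x) []).contains (pvSt x) then d
            else d.modify (pvProv x) [] (fun l => l ++ [pvSt x])) = _
      simp [hc]
    rw [hA]
    refine ⟨?_, ?_⟩
    · rw [PySem.Dict.keys_insert_of_not_contains _ _ hc, hk, pvP_snoc,
        PySem.Set.add_of_not_mem (by rw [pvP, PySem.Set.mem_ofList]; exact hm)]
    · intro q
      by_cases hq : q = pvProv x
      · subst hq
        rw [PySem.Dict.get?_insert_self, pvS_snoc_eq, pvS_of_not_mem l (pvProv x) hm]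
        simp [PySem.Set.add]
      · rw [PySem.Dict.get?_insert_of_ne _ _ hq, hg, pvS_snoc_ne l x q hq]
        simp [List.mem_map, hq]

theorem pvInv_foldl (l : List (List (String × String))) :
    pvInv l (l.foldl stepA PySem.Dict.empty) := by
  induction l using List.reverseRecOn with
  | nil => exact ⟨rfl, fun p => by simp [PySem.Dict.get?_empty]⟩
  | append_singleton xs x ih =>
    rw [List.foldl_append]
    exact pvInv_step xs _ x ih

-- ===== VERDICT (by name: the statement is the Claim_ definition above) =====
theorem city_fmt_py_spec : Claim_equal_city_fmt_py := by
  intro json_data _ _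
  show city_fmt_py json_data = city_fmt_py_alt json_data
  obtain ⟨hk, hg⟩ := pvInv_foldl json_data
  have hnd : (json_data.foldl stepA PySem.Dict.empty).keys.Nodup := by
    rw [hk]; exact PySem.Set.nodup_ofList _
  unfold city_fmt_py city_fmt_py_alt
  rw [PySem.Dict.items_eq_map_keys _ hnd [], hk]
  refine List.map_congr_left ?_
  intro q hq
  have hmem : q ∈ json_data.map pvProv := (PySem.Set.mem_ofList _ _).mp hq
  have hgq : (json_data.foldl stepA PySem.Dict.empty).get? q = some (pvS json_data q) := by
    rw [hg]; simp [hmem]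
  rw [PySem.Dict.getD_of_get?_eq_some _ [] hgq]
  simp only [pvS]
  rfl
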